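-- pv_equiv track=rewrite | github.com/mennakhaled898/EscapeRoom | main.py | sort_score_h
-- ===== SOURCE A (Python) =====
-- from collections import deque, Counter
--
-- def sort_score_h(tubes):
--     miss = 0
--     for tube in tubes:
--         if not tube:
--             continue
--         maj = Counter(tube).most_common(1)[0][0]
--         miss += sum(1 for b in tube if b != maj)
--     return miss
-- ===== SOURCE B (Python) =====
-- def _max_freq(t):
--     # recursive partitioning over distinct values: count of t[0] is what the
--     # filter removes; recurse on the remainder.  No Counter, no dict.
--     if not t:
--         return 0
--     rest = [b for b in t if b != t[0]]
--     return max(len(t) - len(rest), _max_freq(rest))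
--
-- def sort_score_h(tubes):
--     miss = 0
--     for tube in tubes:
--         if tube:
--             miss += len(tube) - _max_freq(tube)
--     return miss
-- ===== Notes on version B (the rewrite author's own statement) =====
-- stated objective: alternative
-- what changed: Replaces the Counter/most_common majority extraction plus a second mismatch-counting pass with a recursive distinct-value partition: the maximum frequency is computed by repeatedly filtering out one value (its count is the length drop) and recursing, then miss is len(tube) minus that maximum.
import Mathlib
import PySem

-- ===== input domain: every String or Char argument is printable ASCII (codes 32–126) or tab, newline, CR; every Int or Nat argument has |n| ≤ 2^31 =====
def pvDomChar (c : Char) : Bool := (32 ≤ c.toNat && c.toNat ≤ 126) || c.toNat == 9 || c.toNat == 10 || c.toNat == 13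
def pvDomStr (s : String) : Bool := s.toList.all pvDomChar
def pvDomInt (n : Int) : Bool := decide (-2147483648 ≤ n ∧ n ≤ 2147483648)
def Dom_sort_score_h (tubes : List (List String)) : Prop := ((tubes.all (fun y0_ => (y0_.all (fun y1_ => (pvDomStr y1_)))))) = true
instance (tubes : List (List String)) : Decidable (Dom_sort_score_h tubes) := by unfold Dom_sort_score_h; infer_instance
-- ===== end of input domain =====

-- B computes each tube's maximum frequency by recursively partitioning the distinct values
-- (filter out one value, its count is the length drop, recurse) instead of A's Counter +
-- most_common + second mismatch-counting pass; an alternative decomposition, not faster.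

-- ===== PORT A =====
-- for each non-empty tube: maj = Counter(tube).most_common(1)[0][0] (first element of maximal
-- count = PySem.List.max? over the counter's items), then add sum(1 for b in tube if b != maj)
def sort_score_h (tubes : List (List String)) : Int :=
  tubes.foldl
    (fun miss tube =>
      if tube = [] then miss
      else
        match PySem.List.max? (PySem.Dict.counter tube).items (fun p => p.2) with
        | some maj => miss + ((tube.map (fun b => if b ≠ maj.1 then (1 : Int) else 0)).sum)
        | none => miss)  -- unreachable: the guard makes the counter non-empty
    0

-- ===== PORT B =====
-- _max_freq(t): if not t: 0; rest = [b for b in t if b != t[0]]; max(len(t)-len(rest), _max_freq(rest))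
def pvMaxFreq : List String → Int
  | [] => 0
  | x :: r =>
    let rest := (x :: r).filter (fun b => b ≠ x)
    max (((x :: r).length : Int) - (rest.length : Int)) (pvMaxFreq rest)
termination_by t => t.length
decreasing_by
  have : (r.filter (fun b => decide (b ≠ x))).length ≤ r.length := List.length_filter_le _ _
  simp_all [List.filter]

-- miss = 0; for tube in tubes: if tube: miss += len(tube) - _max_freq(tube)
def sort_score_h_alt (tubes : List (List String)) : Int :=
  tubes.foldl
    (fun miss tube =>
      if tube.isEmpty then miss
      else miss + ((tube.length : Int) - pvMaxFreq tube))
    0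

-- ===== PRECONDITION & SPEC =====
def Spec_sort_score_h (tubes : List (List String)) (out : Int) : Prop := out = sort_score_h_alt tubes
instance (tubes : List (List String)) (out : Int) : Decidable (Spec_sort_score_h tubes out) := by unfold Spec_sort_score_h; infer_instance

-- ===== CLAIM (what is proved, stated in full; the proofs are below) =====
def Claim_equal_sort_score_h : Prop := ∀ (tubes : List (List String)), Dom_sort_score_h tubes → Spec_sort_score_h tubes (sort_score_h tubes)

-- ===== LEMMAS AND PROOFS =====

-- the filtered remainder's length drop is exactly the count of the removed value
lemma filter_ne_length (l : List String) (x : String) :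
    (l.filter (fun b => b ≠ x)).length + l.count x = l.length := by
  rw [← List.countP_eq_length_filter]
  have h1 := l.length_eq_countP_add_countP (fun b => b == x)
  have h2 : l.countP (fun b => decide (b ≠ x)) = l.countP (fun a => decide ¬((fun b => b == x) a = true)) := by
    apply List.countP_congr; intro a _; simp
  simp only [List.count, h2]
  omega

-- filtering out x leaves the count of any other value unchanged
lemma count_filter_ne (l : List String) (y x : String) (h : y ≠ x) :
    (l.filter (fun b => b ≠ x)).count y = l.count y := by
  rw [List.count_filter]; simp [h]

-- pvMaxFreq dominates every multiplicity
lemma pvMaxFreq_ge_aux (n : Nat) : ∀ (t : List String), t.length ≤ n → ∀ x ∈ t, (t.count x : Int) ≤ pvMaxFreq t := by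
  induction n with
  | zero => intro t hlen x hx; rw [Nat.le_zero, List.length_eq_zero_iff] at hlen; subst hlen; simp at hx
  | succ n ihn =>
      rintro (_ | ⟨x, r⟩) hlen y hy
      · simp at hy
      have ih : ∀ z ∈ (x :: r).filter (fun b => b ≠ x),
          ((((x :: r).filter (fun b => b ≠ x)).count z : Int)) ≤ pvMaxFreq ((x :: r).filter (fun b => b ≠ x)) := by
        intro z hz
        refine ihn _ ?_ z hz
        have h1 : ((x :: r).filter (fun b => b ≠ x)).length ≤ r.length := by
          simp [List.filter]; exact List.length_filter_le _ _
        simp at hlen; omega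
      rw [pvMaxFreq]
      by_cases hyx : y = x
      · subst hyx
        have := filter_ne_length (y :: r) y
        have : ((y :: r).count y : Int)
            = ((y :: r).length : Int) - (((y :: r).filter (fun b => b ≠ y)).length : Int) := by
          push_cast [← this]; ring
        rw [this]
        exact le_max_left _ _
      · have hmem : y ∈ (x :: r).filter (fun b => b ≠ x) := by
          rw [List.mem_filter]; exact ⟨hy, by simp [hyx]⟩
        have hcnt := count_filter_ne (x :: r) y x hyx
        calc ((x :: r).count y : Int)
            = (((x :: r).filter (fun b => b ≠ x)).count y : Int) := by rw [hcnt]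
          _ ≤ pvMaxFreq ((x :: r).filter (fun b => b ≠ x)) := ih _ hmem
          _ ≤ _ := le_max_right _ _

-- pvMaxFreq is attained by some element of a non-empty list
lemma pvMaxFreq_ge (t : List String) : ∀ x ∈ t, (t.count x : Int) ≤ pvMaxFreq t :=
  pvMaxFreq_ge_aux t.length t le_rfl

lemma pvMaxFreq_exists_aux (n : Nat) : ∀ (t : List String), t.length ≤ n → t ≠ [] →
    ∃ y ∈ t, pvMaxFreq t = (t.count y : Int) := by
  induction n with
  | zero => intro t hlen ht; rw [Nat.le_zero, List.length_eq_zero_iff] at hlen; exact absurd hlen ht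
  | succ n ihn =>
      rintro (_ | ⟨x, r⟩) hlen ht
      · exact absurd rfl ht
      have ih : (x :: r).filter (fun b => b ≠ x) ≠ [] →
          ∃ y ∈ (x :: r).filter (fun b => b ≠ x),
            pvMaxFreq ((x :: r).filter (fun b => b ≠ x)) = ((((x :: r).filter (fun b => b ≠ x)).count y : Int)) := by
        intro hne
        refine ihn _ ?_ hne
        have h1 : ((x :: r).filter (fun b => b ≠ x)).length ≤ r.length := by
          simp [List.filter]; exact List.length_filter_le _ _
        simp at hlen; omega
      rw [pvMaxFreq]
      have hx : (((x :: r).length : Int) - (((x :: r).filter (fun b => b ≠ x)).length : Int))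
          = ((x :: r).count x : Int) := by
        have := filter_ne_length (x :: r) x
        push_cast [← this]; ring
      rcases eq_or_ne ((x :: r).filter (fun b => b ≠ x)) [] with hrest | hrest
      · refine ⟨x, by simp, ?_⟩
        rw [hx, hrest]
        simp only [pvMaxFreq]
        omega
      · obtain ⟨y, hy, hyeq⟩ := ih hrest
        have hymem : y ∈ x :: r := (List.mem_filter.mp hy).1
        have hyx : y ≠ x := by
          have := (List.mem_filter.mp hy).2; simpa using this
        rcases max_cases (((x :: r).length : Int) - (((x :: r).filter (fun b => b ≠ x)).length : Int))
            (pvMaxFreq ((x :: r).filter (fun b => b ≠ x))) with ⟨hmax, _⟩ | ⟨hmax, _⟩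
        · exact ⟨x, by simp, by rw [hmax, hx]⟩
        · refine ⟨y, hymem, ?_⟩
          rw [hmax, hyeq, count_filter_ne _ _ _ hyx]

lemma pvMaxFreq_exists (t : List String) (ht : t ≠ []) :
    ∃ y ∈ t, pvMaxFreq t = (t.count y : Int) :=
  pvMaxFreq_exists_aux t.length t le_rfl ht

-- A's per-tube mismatch sum equals len(tube) - pvMaxFreq tube
lemma tube_contrib_eq (tube : List String) (maj : String × Int)
    (hm : PySem.List.max? (PySem.Dict.counter tube).items (fun p => p.2) = some maj) :
    ((tube.map (fun b => if b ≠ maj.1 then (1 : Int) else 0)).sum)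
    = (tube.length : Int) - pvMaxFreq tube := by
  have hmajmem := PySem.List.max?_mem hm
  rw [PySem.Dict.items_counter] at hmajmem
  obtain ⟨k, hk, hkeq⟩ := List.mem_map.mp hmajmem
  have hk1 : maj.1 = k := by rw [← hkeq]
  have hmaj2 : maj.2 = (tube.count maj.1 : Int) := by rw [← hkeq]
  have hkmem : maj.1 ∈ tube := by rw [hk1]; exact (PySem.Set.mem_ofList tube k).mp hk
  have htne : tube ≠ [] := by rintro rfl; simp at hkmem
  -- maj.2 is the maximum multiplicity, hence equals pvMaxFreq tube
  have hmaxcnt : ∀ x ∈ tube, (tube.count x : Int) ≤ maj.2 := by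
    intro x hx
    have hxitem : (x, (tube.count x : Int)) ∈ (PySem.Dict.counter tube).items := by
      rw [PySem.Dict.items_counter]
      exact List.mem_map_of_mem ((PySem.Set.mem_ofList tube x).mpr hx)
    exact PySem.List.max?_isMax hm _ hxitem
  have heq : (tube.count maj.1 : Int) = pvMaxFreq tube := by
    obtain ⟨y, hy, hyeq⟩ := pvMaxFreq_exists tube htne
    have h1 := pvMaxFreq_ge tube maj.1 hkmem
    have h2 := hmaxcnt y hy
    rw [← hmaj2] at *
    omega
  -- the 0/1 sum counts mismatches = len - count maj.1
  rw [show (fun b => if b ≠ maj.1 then (1 : Int) else 0)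
        = (fun b => if decide (b ≠ maj.1) = true then (1 : Int) else 0) from by
      funext b; simp]
  rw [PySem.List.sum_map_ite_one_zero]
  have := filter_ne_length tube maj.1
  rw [← List.countP_eq_length_filter] at this
  rw [← heq]
  omega

-- the two loop bodies agree pointwise, hence the folds agree
lemma step_eq :
    (fun (miss : Int) (tube : List String) =>
      if tube = [] then miss
      else
        match PySem.List.max? (PySem.Dict.counter tube).items (fun p => p.2) with
        | some maj => miss + ((tube.map (fun b => if b ≠ maj.1 then (1 : Int) else 0)).sum)
        | none => miss)
    = (fun (miss : Int) (tube : List String) =>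
      if tube.isEmpty then miss
      else miss + ((tube.length : Int) - pvMaxFreq tube)) := by
  funext miss tube
  by_cases ht : tube = []
  · simp [ht]
  · rw [if_neg ht, if_neg (by simpa [List.isEmpty_iff] using ht)]
    cases hm : PySem.List.max? (PySem.Dict.counter tube).items (fun p => p.2) with
    | none =>
        rw [PySem.List.max?_eq_none_iff, PySem.Dict.items_counter, List.map_eq_nil_iff] at hm
        obtain ⟨x, r, rfl⟩ := List.exists_cons_of_ne_nil ht
        have hx := (PySem.Set.mem_ofList (x :: r) x).mpr (by simp)
        rw [hm] at hx
        simp at hx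
    | some maj =>
        dsimp only
        rw [tube_contrib_eq tube maj hm]

-- ===== VERDICT (by name: the statement is the Claim_ definition above) =====
theorem sort_score_h_spec : Claim_equal_sort_score_h := by
  intro tubes _
  show sort_score_h tubes = sort_score_h_alt tubes
  rw [sort_score_h, sort_score_h_alt, step_eq]
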